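-- pv_equiv track=rewrite | github.com/facebookresearch/EditEval | src/utils.py | get_dataset_categories
-- ===== SOURCE A (Python) =====
-- from typing import List, Dict, Any, Tuple
--
-- categories_dict = {
--     "clarity": ["iterater_clarity"],
--     "coherence": ["iterater_coherence"],
--     "fluency": ["jfleg", "iterater_fluency"],
--     "neutralization": ["wnc"],
--     "paraphrasing": ["paws", "stsb_multi_mt", "mrpc"],
--     "simplification": ["turk", "asset"],
--     "updating": ["fruit", "wafer_insert"],
-- }
--
-- def get_dataset_categories(dataset_names: List[str]) -> Tuple[List[str], Dict[str, str]]: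
--     categories_list = []
--     for dataset_name in dataset_names:
--         for categories, datasets in categories_dict.items():
--             if dataset_name in datasets:
--                 categories_list.append(categories)
--                 continue
--     return categories_list
-- ===== SOURCE B (Python) =====
-- from typing import List, Dict, Any, Tuple
--
-- categories_dict = {
--     "clarity": ["iterater_clarity"],
--     "coherence": ["iterater_coherence"],
--     "fluency": ["jfleg", "iterater_fluency"],
--     "neutralization": ["wnc"],
--     "paraphrasing": ["paws", "stsb_multi_mt", "mrpc"],
--     "simplification": ["turk", "asset"],
--     "updating": ["fruit", "wafer_insert"],
-- }
--
-- def get_dataset_categories(dataset_names):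
--     reverse = {ds: cat for cat, lst in categories_dict.items() for ds in lst}
--     return [reverse[name] for name in dataset_names if name in reverse]
-- ===== Notes on version B (the rewrite author's own statement) =====
-- stated objective: simpler
-- what changed: B builds a reverse dataset-to-category dict once and does one comprehension over the names, removing A's inner scan over the whole category dict for every name.
import Mathlib
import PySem

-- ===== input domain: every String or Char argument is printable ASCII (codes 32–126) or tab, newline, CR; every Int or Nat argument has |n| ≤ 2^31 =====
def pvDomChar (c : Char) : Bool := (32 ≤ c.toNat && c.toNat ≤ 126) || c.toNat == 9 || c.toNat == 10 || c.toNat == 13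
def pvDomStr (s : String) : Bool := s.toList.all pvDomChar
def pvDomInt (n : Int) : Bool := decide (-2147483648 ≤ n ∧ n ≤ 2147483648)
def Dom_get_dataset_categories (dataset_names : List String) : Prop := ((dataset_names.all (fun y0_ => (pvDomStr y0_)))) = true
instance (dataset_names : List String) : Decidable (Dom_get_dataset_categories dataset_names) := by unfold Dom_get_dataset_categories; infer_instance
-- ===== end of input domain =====

-- B replaces A's per-name scan over the category table by a reverse dataset→category dict built once (objective: simpler).

-- ===== PORT A =====
-- the module constant categories_dict, in insertion order
def categoriesDict : List (String × List String) :=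
  [("clarity", ["iterater_clarity"]),
   ("coherence", ["iterater_coherence"]),
   ("fluency", ["jfleg", "iterater_fluency"]),
   ("neutralization", ["wnc"]),
   ("paraphrasing", ["paws", "stsb_multi_mt", "mrpc"]),
   ("simplification", ["turk", "asset"]),
   ("updating", ["fruit", "wafer_insert"])]

def get_dataset_categories (dataset_names : List String) : List String :=
  dataset_names.foldl
    (fun categories_list dataset_name =>
      categoriesDict.foldl
        (fun categories_list p =>
          if p.2.contains dataset_name then categories_list ++ [p.1] else categories_list)
        categories_list)
    []

-- ===== PORT B =====
-- {ds: cat for cat, lst in categories_dict.items() for ds in lst}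
def reverseDict : PySem.Dict String String :=
  categoriesDict.foldl
    (fun d p => p.2.foldl (fun d ds => d.insert ds p.1) d)
    PySem.Dict.empty

-- [reverse[name] for name in dataset_names if name in reverse]
def get_dataset_categories_alt (dataset_names : List String) : List String :=
  dataset_names.filterMap (fun name => reverseDict.get? name)

-- ===== PRECONDITION & SPEC =====
def Spec_get_dataset_categories (dataset_names : List String) (out : List String) : Prop := out = get_dataset_categories_alt dataset_names
instance (dataset_names : List String) (out : List String) : Decidable (Spec_get_dataset_categories dataset_names out) := by unfold Spec_get_dataset_categories; infer_instance

-- ===== CLAIM (what is proved, stated in full; the proofs are below) =====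
def Claim_equal_get_dataset_categories : Prop := ∀ (dataset_names : List String), Dom_get_dataset_categories dataset_names → Spec_get_dataset_categories dataset_names (get_dataset_categories dataset_names)

-- ===== LEMMAS AND PROOFS =====

-- per-name agreement: A's scan over the table contributes exactly the reverse-dict lookup
theorem inner_eq (acc : List String) (s : String) :
    categoriesDict.foldl
      (fun categories_list p =>
        if p.2.contains s then categories_list ++ [p.1] else categories_list)
      acc
    = acc ++ (reverseDict.get? s).toList := by
  by_cases h1 : s = "iterater_clarity"
  · subst h1; rfl
  by_cases h2 : s = "iterater_coherence"
  · subst h2; rfl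
  by_cases h3 : s = "jfleg"
  · subst h3; rfl
  by_cases h4 : s = "iterater_fluency"
  · subst h4; rfl
  by_cases h5 : s = "wnc"
  · subst h5; rfl
  by_cases h6 : s = "paws"
  · subst h6; rfl
  by_cases h7 : s = "stsb_multi_mt"
  · subst h7; rfl
  by_cases h8 : s = "mrpc"
  · subst h8; rfl
  by_cases h9 : s = "turk"
  · subst h9; rfl
  by_cases h10 : s = "asset"
  · subst h10; rfl
  by_cases h11 : s = "fruit"
  · subst h11; rfl
  by_cases h12 : s = "wafer_insert"
  · subst h12; rfl
  · simp [categoriesDict, reverseDict, List.foldl, PySem.Dict.get?, PySem.Dict.insert,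
      PySem.Dict.empty, h1, h2, h3, h4, h5, h6, h7, h8, h9, h10, h11, h12,
      Ne.symm h1, Ne.symm h2, Ne.symm h3, Ne.symm h4, Ne.symm h5, Ne.symm h6,
      Ne.symm h7, Ne.symm h8, Ne.symm h9, Ne.symm h10, Ne.symm h11, Ne.symm h12]

theorem outer_eq (names : List String) (acc : List String) :
    names.foldl
      (fun categories_list dataset_name =>
        categoriesDict.foldl
          (fun categories_list p =>
            if p.2.contains dataset_name then categories_list ++ [p.1] else categories_list)
          categories_list)
      acc
    = acc ++ names.filterMap (fun name => reverseDict.get? name) := by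
  induction names generalizing acc with
  | nil => simp
  | cons n t ih =>
    simp only [List.foldl_cons, List.filterMap_cons]
    rw [ih, inner_eq]
    cases reverseDict.get? n <;> simp

-- ===== VERDICT (by name: the statement is the Claim_ definition above) =====
theorem get_dataset_categories_spec : Claim_equal_get_dataset_categories := by
  intro names _
  unfold Spec_get_dataset_categories get_dataset_categories get_dataset_categories_alt
  simpa using outer_eq names []
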